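-- pv_equiv track=rewrite | github.com/shubro18202758/Indian_Military_Scheduling_System | backend/app/services/military_algorithms.py | _generate_initial_solution
-- ===== SOURCE A (Python) =====
-- from typing import Dict, List, Optional, Tuple, Any
--
-- def _generate_initial_solution(cargo_items: List[Dict], vehicles: Dict[str, int]) -> Dict:
--     # Simple greedy initial solution
--     solution = {v: [] for v in vehicles.keys()}
--     for item in cargo_items:
--         # Find vehicle with capacity
--         for vehicle, count in vehicles.items():
--             if count > 0:
--                 solution[vehicle].append(item)
--                 break
--     return solution
-- ===== SOURCE B (Python) =====
-- def _generate_initial_solution(cargo_items, vehicles):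
--     # Find the first vehicle with positive capacity once, then assign all cargo to it.
--     target = next((v for v, c in vehicles.items() if c > 0), None)
--     return {v: (list(cargo_items) if v == target else []) for v in vehicles.keys()}
-- ===== Notes on version B (the rewrite author's own statement) =====
-- stated objective: simpler
-- what changed: A appends items one by one inside a loop that rescans the vehicle dict per item; B finds the first positive-capacity vehicle once and assigns the whole cargo list to it in a single dict comprehension.
import Mathlib
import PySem

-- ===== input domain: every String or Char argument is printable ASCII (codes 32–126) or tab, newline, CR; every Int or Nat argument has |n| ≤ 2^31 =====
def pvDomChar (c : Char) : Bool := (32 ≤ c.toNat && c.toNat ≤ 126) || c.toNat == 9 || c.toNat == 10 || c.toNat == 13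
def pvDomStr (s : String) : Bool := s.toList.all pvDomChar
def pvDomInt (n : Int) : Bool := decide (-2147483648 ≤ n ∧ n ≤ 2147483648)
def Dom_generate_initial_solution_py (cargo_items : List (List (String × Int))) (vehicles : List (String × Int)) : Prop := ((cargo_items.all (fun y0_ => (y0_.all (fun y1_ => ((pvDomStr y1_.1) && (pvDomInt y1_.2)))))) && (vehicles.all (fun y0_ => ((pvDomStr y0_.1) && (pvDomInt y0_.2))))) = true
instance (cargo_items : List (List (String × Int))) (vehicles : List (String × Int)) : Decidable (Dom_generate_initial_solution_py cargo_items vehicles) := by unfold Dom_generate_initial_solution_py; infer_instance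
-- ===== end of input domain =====

-- B replaces A's per-item rescan of the vehicle dict by one upfront search for the
-- first positive-capacity vehicle and a single bulk assignment (objective: simpler).
-- ===== PORT A =====
-- A: build {v: [] for v in vehicles}, then for each item scan vehicles for the
-- first positive count and append the item to that vehicle's list.
def generate_initial_solution_py (cargo_items : List (List (String × Int))) (vehicles : List (String × Int)) : List (String × List (List (String × Int))) :=
  let vd := PySem.Dict.ofList vehicles
  let solution : PySem.Dict String (List (List (String × Int))) :=
    vd.keys.foldl (fun s v => s.insert v []) PySem.Dict.empty
  let solution := cargo_items.foldl (fun s item =>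
    match vd.items.find? (fun p => decide (0 < p.2)) with
    | some (vehicle, _) => s.modify vehicle [] (fun l => l ++ [item])
    | none => s) solution
  solution.items

-- ===== PORT B =====
-- B: find the first positive-capacity vehicle once; one comprehension builds the result.
def generate_initial_solution_py_alt (cargo_items : List (List (String × Int))) (vehicles : List (String × Int)) : List (String × List (List (String × Int))) :=
  let vd := PySem.Dict.ofList vehicles
  let target := (vd.items.find? (fun p => decide (0 < p.2))).map (·.1)
  vd.keys.map (fun v => (v, if some v = target then cargo_items else []))

-- ===== PRECONDITION & SPEC =====
def Spec_generate_initial_solution_py (cargo_items : List (List (String × Int))) (vehicles : List (String × Int)) (out : List (String × List (List (String × Int)))) : Prop := out = generate_initial_solution_py_alt cargo_items vehicles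
instance (cargo_items : List (List (String × Int))) (vehicles : List (String × Int)) (out : List (String × List (List (String × Int)))) : Decidable (Spec_generate_initial_solution_py cargo_items vehicles out) := by unfold Spec_generate_initial_solution_py; infer_instance

-- ===== CLAIM (what is proved, stated in full; the proofs are below) =====
def Claim_equal_generate_initial_solution_py : Prop := ∀ (cargo_items : List (List (String × Int))) (vehicles : List (String × Int)), Dom_generate_initial_solution_py cargo_items vehicles → Spec_generate_initial_solution_py cargo_items vehicles (generate_initial_solution_py cargo_items vehicles)

-- ===== LEMMAS AND PROOFS =====

-- A's append loop at a fixed key t: the items list keeps its shape, with the t-entry's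
-- value extended by the whole cargo list.
theorem foldl_modify_const_items (t : String) (l : List (List (String × Int)))
    (d : PySem.Dict String (List (List (String × Int))))
    (ht : d.contains t = true) (hnd : d.keys.Nodup) :
    (l.foldl (fun s item => s.modify t [] (fun ys => ys ++ [item])) d).items
      = d.items.map (fun p => if p.1 == t then (t, d.getD t [] ++ l) else p) := by
  induction l generalizing d with
  | nil =>
    simp only [List.foldl_nil, List.append_nil]
    symm
    have hid : d.items = List.map id d.items := (List.map_id _).symm
    refine Eq.trans (List.map_congr_left ?_) hid.symm
    intro p hp
    by_cases h : p.1 = t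
    · have h2 : d.get? p.1 = some p.2 :=
        PySem.Dict.get?_of_mem_items d (by simpa using hp) hnd
      have hv : d.getD t [] = p.2 := by
        rw [← h, PySem.Dict.getD_eq_get?_getD, h2]; rfl
      simp only [h, beq_self_eq_true, if_true, hv, id_eq]
      exact Prod.ext_iff.mpr ⟨h.symm, rfl⟩
    · simp [h]
  | cons x xs ih =>
    simp only [List.foldl_cons]
    have hmod : d.modify t [] (fun ys => ys ++ [x]) = d.insert t (d.getD t [] ++ [x]) := rfl
    rw [hmod]
    rw [ih (d.insert t (d.getD t [] ++ [x]))
        (by simp) (PySem.Dict.nodup_keys_insert d _ _ hnd)]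
    rw [PySem.Dict.items_insert_of_contains d _ ht, List.map_map]
    refine List.map_congr_left ?_
    intro p _
    by_cases h : p.1 = t
    · simp [Function.comp, h, PySem.Dict.getD_insert_self]
    · simp [Function.comp, h]

-- The initial comprehension {v: [] for v in keys} as an items list.
theorem init_items (vehicles : List (String × Int)) :
    ((PySem.Dict.ofList vehicles).keys.foldl
        (fun (s : PySem.Dict String (List (List (String × Int)))) v => s.insert v [])
        PySem.Dict.empty).items
      = (PySem.Dict.ofList vehicles).keys.map (fun k => (k, ([] : List (List (String × Int))))) := by
  have h := PySem.Dict.items_foldl_insert_fresh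
      (l := (PySem.Dict.ofList vehicles).keys) (k := fun v => v)
      (v := fun _ => ([] : List (List (String × Int)))) (d := PySem.Dict.empty)
      (by intro a _; simp [PySem.Dict.contains_empty])
      (by simp [PySem.Dict.nodup_keys_ofList vehicles])
  simpa [PySem.Dict.items, PySem.Dict.empty] using h

theorem main_equiv (cargo_items : List (List (String × Int))) (vehicles : List (String × Int)) :
    generate_initial_solution_py cargo_items vehicles
      = generate_initial_solution_py_alt cargo_items vehicles := by
  unfold generate_initial_solution_py generate_initial_solution_py_alt
  set vd := PySem.Dict.ofList vehicles with hvd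
  set sol0 : PySem.Dict String (List (List (String × Int))) :=
    vd.keys.foldl (fun s v => s.insert v []) PySem.Dict.empty with hsol0
  have hitems : sol0.items = vd.keys.map (fun k => (k, ([] : List (List (String × Int))))) :=
    init_items vehicles
  have hkeys : sol0.keys = vd.keys := by
    simp [PySem.Dict.keys, hitems, List.map_map, Function.comp]
  have hnd : sol0.keys.Nodup := by rw [hkeys]; exact PySem.Dict.nodup_keys_ofList vehicles
  cases hf : vd.items.find? (fun p => decide (0 < p.2)) with
  | none =>
    simp only [hf, Option.map_none]
    have : cargo_items.foldl (fun s (item : List (String × Int)) =>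
        match (none : Option (String × Int)) with
        | some (vehicle, _) => s.modify vehicle [] (fun l => l ++ [item])
        | none => s) sol0 = sol0 := by
      induction cargo_items with
      | nil => rfl
      | cons x xs ih => simp [ih]
    rw [this, hitems]
    simp
  | some p =>
    obtain ⟨t, c⟩ := p
    have htmem : t ∈ vd.keys := by
      have hm := List.mem_of_find?_eq_some hf
      exact PySem.Dict.mem_keys_of_mem_items vd hm
    have hcont : sol0.contains t = true :=
      (PySem.Dict.contains_iff_mem_keys sol0 t).mpr (by rw [hkeys]; exact htmem)
    have htit : (t, ([] : List (List (String × Int)))) ∈ sol0.items := by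
      rw [hitems]; exact List.mem_map.mpr ⟨t, htmem, rfl⟩
    have hgetD : sol0.getD t [] = [] := PySem.Dict.getD_of_mem_items sol0 htit hnd []
    simp only [hf, Option.map_some]
    show (cargo_items.foldl (fun s item => s.modify t [] (fun l => l ++ [item])) sol0).items = _
    rw [foldl_modify_const_items t cargo_items sol0 hcont hnd, hgetD, hitems, List.map_map]
    refine List.map_congr_left ?_
    intro k _
    by_cases h : k = t
    · simp [Function.comp, h]
    · simp [Function.comp, h]

-- ===== VERDICT (by name: the statement is the Claim_ definition above) =====
theorem generate_initial_solution_py_spec : Claim_equal_generate_initial_solution_py := by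
  intro cargo_items vehicles _
  unfold Spec_generate_initial_solution_py
  exact main_equiv cargo_items vehicles
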